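-- pv_equiv track=rewrite | github.com/jmplaza75/XSeries-Program-in-Computational-Thinking-using-Python | MITx-6.00.2x-Introduction-to-Computational-Thinking-and-Data-Science/Unit-1/Exercises/yieldallcombos.py | yieldAllCombos
-- ===== SOURCE A (Python) =====
-- def yieldAllCombos(items):
-- 	N = len(items)
-- 	# enumerate the 3**N possible combinations
-- 	for i in range(3**N):
-- 		bag_1 = []
-- 		bag_2 = []
-- 		for j in range(N):
-- 			z = 3**j
-- 			if (i // z) % 3 == 0:
-- 				bag_1.append(items[j])
-- 			elif (i // z) % 3 == 1:
-- 				bag_2.append(items[j])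
-- 		yield (bag_1, bag_2)
-- ===== SOURCE B (Python) =====
-- def yieldAllCombos(items):
--     # recursive decomposition: first item varies fastest, choice order bag1 -> bag2 -> neither
--     if not items:
--         yield ([], [])
--         return
--     first = items[0]
--     for b1, b2 in yieldAllCombos(items[1:]):
--         yield ([first] + b1, list(b2))
--         yield (list(b1), [first] + b2)
--         yield (list(b1), list(b2))
-- ===== Notes on version B (the rewrite author's own statement) =====
-- stated objective: alternative
-- what changed: Replaced the base-3 counter (outer loop over 3**N indices with per-item power/divmod digit extraction) by a direct recursion on the list that yields, for each combination of the tail, the three placements of the head in the same order.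
import Mathlib
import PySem

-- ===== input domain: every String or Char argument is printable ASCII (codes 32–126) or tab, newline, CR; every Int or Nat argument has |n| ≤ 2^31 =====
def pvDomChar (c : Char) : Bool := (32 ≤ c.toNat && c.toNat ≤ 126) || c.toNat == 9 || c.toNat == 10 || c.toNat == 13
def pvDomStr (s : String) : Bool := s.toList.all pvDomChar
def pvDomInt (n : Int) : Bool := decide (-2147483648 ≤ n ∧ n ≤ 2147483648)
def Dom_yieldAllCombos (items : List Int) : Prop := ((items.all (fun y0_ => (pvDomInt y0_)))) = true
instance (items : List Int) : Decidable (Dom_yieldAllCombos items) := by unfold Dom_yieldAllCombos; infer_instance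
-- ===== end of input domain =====

-- B replaces A's base-3 index enumeration by a direct recursion on the list (same output order); proved equal on all inputs.

-- ===== PORT A =====
-- inner 'for j in range(N)' loop body of A
def pvInnerStep (items : List Int) (i : Int) (bags : List Int × List Int) (j : Int) : List Int × List Int :=
  let z : Int := (3 : Int) ^ j.toNat  -- z = 3 ** j; j comes from range(N) so j ≥ 0 and toNat is exact
  if PySem.Int.mod (PySem.Int.floordiv i z) 3 = 0 then
    (bags.1 ++ [PySem.List.pyGetD items j 0], bags.2)  -- items[j]; 0 ≤ j < len(items), always in range
  else if PySem.Int.mod (PySem.Int.floordiv i z) 3 = 1 then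
    (bags.1, bags.2 ++ [PySem.List.pyGetD items j 0])
  else bags

-- builds (bag_1, bag_2) for one index i
def pvInnerLoop (items : List Int) (i : Int) : List Int × List Int :=
  (PySem.List.pyRange 0 (items.length : Int) 1).foldl (pvInnerStep items i) ([], [])

def yieldAllCombos (items : List Int) : List (List Int × List Int) :=
  (PySem.List.pyRange 0 ((3 ^ items.length : Nat) : Int) 1).foldl
    (fun acc i => acc ++ [pvInnerLoop items i]) []

-- ===== PORT B =====
def yieldAllCombos_alt : List Int → List (List Int × List Int)
  | [] => [([], [])]
  | x :: xs =>
    (yieldAllCombos_alt xs).flatMap (fun p => [(x :: p.1, p.2), (p.1, x :: p.2), (p.1, p.2)])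

-- ===== PRECONDITION & SPEC =====
def Spec_yieldAllCombos (items : List Int) (out : List (List Int × List Int)) : Prop := out = yieldAllCombos_alt items
instance (items : List Int) (out : List (List Int × List Int)) : Decidable (Spec_yieldAllCombos items out) := by unfold Spec_yieldAllCombos; infer_instance

-- ===== CLAIM (what is proved, stated in full; the proofs are below) =====
def Claim_equal_yieldAllCombos : Prop := ∀ (items : List Int), Dom_yieldAllCombos items → Spec_yieldAllCombos items (yieldAllCombos items)

-- ===== LEMMAS AND PROOFS =====

-- recursive characterisation of A's inner loop (digit j of i decides item j)
def pvG : List Int → Int → List Int × List Int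
  | [], _ => ([], [])
  | x :: xs, i =>
    let p := pvG xs (PySem.Int.floordiv i 3)
    if PySem.Int.mod i 3 = 0 then (x :: p.1, p.2)
    else if PySem.Int.mod i 3 = 1 then (p.1, x :: p.2)
    else p

theorem pvInnerStep_shift (items : List Int) (i : Int) (a b : List Int) (j : Int) :
    pvInnerStep items i (a, b) j =
      (a ++ (pvInnerStep items i ([], []) j).1, b ++ (pvInnerStep items i ([], []) j).2) := by
  simp only [pvInnerStep]
  split_ifs <;> simp

theorem pvFoldl_innerStep_shift (items : List Int) (i : Int) (l : List Int) (a b : List Int) :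
    l.foldl (pvInnerStep items i) (a, b) =
      (a ++ (l.foldl (pvInnerStep items i) ([], [])).1,
       b ++ (l.foldl (pvInnerStep items i) ([], [])).2) := by
  induction l generalizing a b with
  | nil => simp
  | cons j l ih =>
    rcases hj : pvInnerStep items i ([], []) j with ⟨u, v⟩
    rw [List.foldl_cons, List.foldl_cons, pvInnerStep_shift items i a b j, hj, ih (a ++ u) (b ++ v), ih u v]
    simp

theorem pvInnerStep_succ (x : Int) (xs : List Int) (i : Int) (s : List Int × List Int) (k : Nat) :
    pvInnerStep (x :: xs) i s (1 + (k : Int)) = pvInnerStep xs (PySem.Int.floordiv i 3) s (k : Int) := by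
  have ht : ((1 : Int) + (k : Int)).toNat = k + 1 := by omega
  have hdiv : PySem.Int.floordiv i ((3 : Int) ^ ((1 : Int) + (k : Int)).toNat)
      = PySem.Int.floordiv (PySem.Int.floordiv i 3) ((3 : Int) ^ ((k : Int)).toNat) := by
    rw [ht, PySem.Int.floordiv_eq_ediv_of_pos (by positivity),
        PySem.Int.floordiv_eq_ediv_of_pos (by norm_num),
        PySem.Int.floordiv_eq_ediv_of_pos (by positivity),
        Int.ediv_ediv_of_nonneg (by norm_num : (0:Int) ≤ 3),
        Int.toNat_natCast, pow_succ]
    ring_nf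
  have hget : PySem.List.pyGetD (x :: xs) ((1 : Int) + (k : Int)) 0 = PySem.List.pyGetD xs (k : Int) 0 := by
    have h1 : ((1 : Int) + (k : Int)) = ((k + 1 : Nat) : Int) := by push_cast; ring
    rw [h1, PySem.List.pyGetD_natCast, PySem.List.pyGetD_natCast]
    simp [List.getD]
  simp only [pvInnerStep, hdiv, hget]

theorem pvInnerLoop_nil (i : Int) : pvInnerLoop [] i = ([], []) := by
  unfold pvInnerLoop
  rw [show ((([] : List Int)).length : Int) = ((0 : Nat) : Int) by simp,
      PySem.List.pyRange_zero_nat 0]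
  simp

theorem pvInnerLoop_cons (x : Int) (xs : List Int) (i : Int) :
    pvInnerLoop (x :: xs) i =
      (let p := pvInnerLoop xs (PySem.Int.floordiv i 3)
       if PySem.Int.mod i 3 = 0 then (x :: p.1, p.2)
       else if PySem.Int.mod i 3 = 1 then (p.1, x :: p.2)
       else p) := by
  have hlen : (((x :: xs).length : Nat) : Int) = (xs.length : Int) + 1 := by
    push_cast [List.length_cons]; ring
  have hcons : PySem.List.pyRange 0 ((xs.length : Int) + 1) 1
      = 0 :: PySem.List.pyRange 1 ((xs.length : Int) + 1) 1 :=
    PySem.List.pyRange_one_cons (by positivity)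
  have hshift : PySem.List.pyRange 1 ((xs.length : Int) + 1) 1
      = (List.range xs.length).map (fun k : Nat => 1 + (k : Int)) := by
    rw [PySem.List.pyRange_one]
    have : ((xs.length : Int) + 1 - 1).toNat = xs.length := by omega
    rw [this]
  have hrange0 : PySem.List.pyRange 0 ((xs.length : Nat) : Int) 1
      = (List.range xs.length).map (fun k : Nat => ((k : Nat) : Int)) :=
    PySem.List.pyRange_zero_nat xs.length
  have hfold : ∀ s : List Int × List Int,
      (PySem.List.pyRange 1 ((xs.length : Int) + 1) 1).foldl (pvInnerStep (x :: xs) i) s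
        = (PySem.List.pyRange 0 ((xs.length : Nat) : Int) 1).foldl
            (pvInnerStep xs (PySem.Int.floordiv i 3)) s := by
    intro s
    rw [hshift, hrange0, List.foldl_map, List.foldl_map]
    apply List.foldl_ext
    intro a m _
    exact pvInnerStep_succ x xs i a m
  have hfd1 : PySem.Int.floordiv i ((3:Int) ^ ((0:Int)).toNat) = i := by
    simp [PySem.Int.floordiv]
  unfold pvInnerLoop
  rw [hlen, hcons, List.foldl_cons, hfold]
  show (PySem.List.pyRange 0 ((xs.length : Nat) : Int) 1).foldl
      (pvInnerStep xs (PySem.Int.floordiv i 3)) (pvInnerStep (x :: xs) i ([], []) 0) = _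
  have hstep0 : pvInnerStep (x :: xs) i ([], []) 0 =
      (if PySem.Int.mod i 3 = 0 then ([x], ([] : List Int))
       else if PySem.Int.mod i 3 = 1 then (([] : List Int), [x])
       else ([], [])) := by
    simp only [pvInnerStep, hfd1]
    split_ifs <;> simp [PySem.List.pyGetD_zero_cons]
  rw [hstep0]
  split_ifs with h0 h1 <;> rw [pvFoldl_innerStep_shift] <;> simp [*]

theorem pvInnerLoop_eq_pvG (items : List Int) (i : Int) : pvInnerLoop items i = pvG items i := by
  induction items generalizing i with
  | nil => rw [pvInnerLoop_nil]; rfl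
  | cons x xs ih => rw [pvInnerLoop_cons, pvG]; simp only [ih]

-- A as a map over List.range
theorem pvA_eq_map (items : List Int) :
    yieldAllCombos items = (List.range (3 ^ items.length)).map (fun k : Nat => pvG items ((k : Nat) : Int)) := by
  unfold yieldAllCombos
  rw [PySem.List.foldl_append_singleton_eq_map, PySem.List.pyRange_zero_nat, List.map_map]
  apply List.map_congr_left
  intro k _
  exact pvInnerLoop_eq_pvG items (k : Int)

theorem pvTriple (m : Nat) (f : Nat → List Int × List Int) :
    (List.range (3 * m)).map f
      = (List.range m).flatMap (fun k => [f (3 * k), f (3 * k + 1), f (3 * k + 2)]) := by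
  induction m with
  | zero => simp
  | succ m ih =>
    have h3 : 3 * (m + 1) = (3 * m + 1 + 1) + 1 := by ring
    rw [h3, List.range_succ, List.range_succ, List.range_succ, List.range_succ]
    simp only [List.map_append, List.flatMap_append, ih]
    simp

theorem pvG_digit (x : Int) (xs : List Int) (k d : Nat) (hd : d < 3) :
    pvG (x :: xs) (((3 * k + d : Nat) : Nat) : Int)
      = (let p := pvG xs ((k : Nat) : Int)
         if d = 0 then (x :: p.1, p.2) else if d = 1 then (p.1, x :: p.2) else p) := by
  have hm : PySem.Int.mod ((3 * k + d : Nat) : Int) 3 = (d : Int) := by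
    have h := PySem.Int.mod_natCast (3 * k + d) 3
    rw [show (((3:Nat)):Int) = (3:Int) by norm_num] at h
    rw [h]
    congr 1
    omega
  have hf : PySem.Int.floordiv ((3 * k + d : Nat) : Int) 3 = (k : Int) := by
    have h := PySem.Int.floordiv_natCast (3 * k + d) 3
    rw [show (((3:Nat)):Int) = (3:Int) by norm_num] at h
    rw [h]
    congr 1
    omega
  rw [pvG]
  simp only [hm, hf]
  have hd3 : d = 0 ∨ d = 1 ∨ d = 2 := by omega
  rcases hd3 with h | h | h <;> subst h <;> norm_num

theorem pvMap_eq_alt (items : List Int) :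
    (List.range (3 ^ items.length)).map (fun k : Nat => pvG items ((k : Nat) : Int)) = yieldAllCombos_alt items := by
  induction items with
  | nil => simp [pvG, yieldAllCombos_alt]
  | cons x xs ih =>
    rw [yieldAllCombos_alt, ← ih]
    have hp : 3 ^ (x :: xs).length = 3 * 3 ^ xs.length := by
      rw [List.length_cons, pow_succ]; ring
    rw [hp, pvTriple, List.flatMap_map]
    apply List.flatMap_congr
    intro k _
    rw [show (3 * k : Nat) = 3 * k + 0 by ring]
    rw [pvG_digit x xs k 0 (by norm_num), pvG_digit x xs k 1 (by norm_num),
        pvG_digit x xs k 2 (by norm_num)]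
    simp

-- ===== VERDICT (by name: the statement is the Claim_ definition above) =====
theorem yieldAllCombos_spec : Claim_equal_yieldAllCombos := by
  intro items _
  unfold Spec_yieldAllCombos
  rw [pvA_eq_map, pvMap_eq_alt]
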